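-- pv_equiv track=rewrite | github.com/hyunjong-MRDL/LIMITLESS_DL | CT_Reconstruction/utils.py | match_ROIs
-- ===== SOURCE A (Python) =====
-- total_ROI_names = ["External", "Bowels", "Lungs", "Breast_L", "Breast_R", "Spleen", "Liver", "Kidney_L", "Kidney_R",
--                    "Gallbladder", "Heart", "Cavity_Oral", "Brachi_L", "Brachi_R", "Sigmoid_Colon", "Bowel_Large",
--                    "Bowel_Samll", "Lung_R", "Trachea", "Esophagus", "Stomach", "Duodenum", "Glnd_Thyroid", "CaudaEquina",
--                    "Parotid_L", "Parotid_R", "Glnd_Submand_L", "Glnd_Submand_R"]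
--
-- def match_ROIs(ROI_namedict_1, ROI_namedict_2):
--     matched_names = []
--     ROI_names_1 = list(ROI_namedict_1.keys())
--     ROI_names_2 = list(ROI_namedict_2.keys())
--     for roi in total_ROI_names:
--         if (roi in ROI_names_1) and (roi in ROI_names_2):
--             matched_names.append(roi)
--     return matched_names
-- ===== SOURCE B (Python) =====
-- total_ROI_names = ["External", "Bowels", "Lungs", "Breast_L", "Breast_R", "Spleen", "Liver", "Kidney_L", "Kidney_R",
--                    "Gallbladder", "Heart", "Cavity_Oral", "Brachi_L", "Brachi_R", "Sigmoid_Colon", "Bowel_Large",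
--                    "Bowel_Samll", "Lung_R", "Trachea", "Esophagus", "Stomach", "Duodenum", "Glnd_Thyroid", "CaudaEquina",
--                    "Parotid_L", "Parotid_R", "Glnd_Submand_L", "Glnd_Submand_R"]
--
-- def match_ROIs(ROI_namedict_1, ROI_namedict_2):
--     order = {name: i for i, name in enumerate(total_ROI_names)}
--     common = set(ROI_namedict_1) & set(ROI_namedict_2)
--     return sorted((name for name in common if name in order), key=lambda name: order[name])
-- ===== Notes on version B (the rewrite author's own statement) =====
-- stated objective: alternative
-- what changed: Instead of scanning the fixed 28-name list and testing each name's membership in both key lists, B builds a name-to-index table once, intersects the two key sets, and reconstructs the canonical order by sorting the common names by their table index.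
import Mathlib
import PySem

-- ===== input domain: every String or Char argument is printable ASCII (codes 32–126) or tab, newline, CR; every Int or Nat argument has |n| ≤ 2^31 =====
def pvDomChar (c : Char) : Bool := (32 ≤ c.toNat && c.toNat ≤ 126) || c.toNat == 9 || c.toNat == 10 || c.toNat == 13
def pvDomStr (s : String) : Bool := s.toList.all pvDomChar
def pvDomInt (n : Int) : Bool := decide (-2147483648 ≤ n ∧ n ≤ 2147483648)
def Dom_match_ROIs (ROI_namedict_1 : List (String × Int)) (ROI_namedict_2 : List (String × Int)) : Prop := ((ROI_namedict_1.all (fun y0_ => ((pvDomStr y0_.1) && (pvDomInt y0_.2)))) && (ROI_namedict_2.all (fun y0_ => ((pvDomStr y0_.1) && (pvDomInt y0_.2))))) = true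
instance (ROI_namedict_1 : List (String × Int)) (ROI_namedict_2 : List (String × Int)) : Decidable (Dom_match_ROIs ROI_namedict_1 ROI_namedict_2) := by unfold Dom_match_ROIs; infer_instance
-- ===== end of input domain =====

-- B replaces A's scan of the fixed name list by an index table + key-set intersection + sort by index (alternative decomposition, same results).

-- module constant total_ROI_names (shared context of both versions)
def totalROINames : List String :=
  ["External", "Bowels", "Lungs", "Breast_L", "Breast_R", "Spleen", "Liver", "Kidney_L", "Kidney_R",
   "Gallbladder", "Heart", "Cavity_Oral", "Brachi_L", "Brachi_R", "Sigmoid_Colon", "Bowel_Large",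
   "Bowel_Samll", "Lung_R", "Trachea", "Esophagus", "Stomach", "Duodenum", "Glnd_Thyroid", "CaudaEquina",
   "Parotid_L", "Parotid_R", "Glnd_Submand_L", "Glnd_Submand_R"]

-- ===== PORT A =====
def match_ROIs (ROI_namedict_1 : List (String × Int)) (ROI_namedict_2 : List (String × Int)) : List String :=
  let ROI_names_1 := ROI_namedict_1.map Prod.fst
  let ROI_names_2 := ROI_namedict_2.map Prod.fst
  totalROINames.foldl (fun matched_names roi =>
    if ROI_names_1.contains roi && ROI_names_2.contains roi then matched_names ++ [roi] else matched_names) []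

-- ===== PORT B =====
-- order = {name: i for i, name in enumerate(total_ROI_names)}
def roiOrder : PySem.Dict String Int :=
  (PySem.List.enumerate totalROINames 0).foldl (fun d p => d.insert p.2 p.1) PySem.Dict.empty

def match_ROIs_alt (ROI_namedict_1 : List (String × Int)) (ROI_namedict_2 : List (String × Int)) : List String :=
  let common : PySem.Set String :=
    PySem.Set.inter (PySem.Set.ofList (ROI_namedict_1.map Prod.fst)) (PySem.Set.ofList (ROI_namedict_2.map Prod.fst))
  -- key = order[name]; every kept name is a key of roiOrder, so getD's default is never read (totality guard only)
  PySem.List.sorted (common.filter (fun name => roiOrder.contains name)) (fun name => roiOrder.getD name 0) false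

-- ===== PRECONDITION & SPEC =====
def Spec_match_ROIs (ROI_namedict_1 : List (String × Int)) (ROI_namedict_2 : List (String × Int)) (out : List String) : Prop := out = match_ROIs_alt ROI_namedict_1 ROI_namedict_2
instance (ROI_namedict_1 : List (String × Int)) (ROI_namedict_2 : List (String × Int)) (out : List String) : Decidable (Spec_match_ROIs ROI_namedict_1 ROI_namedict_2 out) := by unfold Spec_match_ROIs; infer_instance

-- ===== CLAIM (what is proved, stated in full; the proofs are below) =====
def Claim_equal_match_ROIs : Prop := ∀ (ROI_namedict_1 : List (String × Int)) (ROI_namedict_2 : List (String × Int)), Dom_match_ROIs ROI_namedict_1 ROI_namedict_2 → Spec_match_ROIs ROI_namedict_1 ROI_namedict_2 (match_ROIs ROI_namedict_1 ROI_namedict_2)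

-- ===== LEMMAS AND PROOFS =====

set_option maxRecDepth 4096 in
lemma roiOrder_keys : roiOrder.keys = totalROINames := by decide

lemma roiOrder_contains_iff (n : String) : roiOrder.contains n = true ↔ n ∈ totalROINames := by
  rw [PySem.Dict.contains_iff_mem_keys, roiOrder_keys]

lemma totalROINames_nodup : totalROINames.Nodup := by decide

set_option maxRecDepth 8192 in
lemma totalROINames_pairwise :
    totalROINames.Pairwise (fun a b => roiOrder.getD a 0 < roiOrder.getD b 0) := by decide

theorem match_ROIs_eq_filter (d1 d2 : List (String × Int)) :
    match_ROIs d1 d2 = totalROINames.filter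
      (fun roi => (d1.map Prod.fst).contains roi && (d2.map Prod.fst).contains roi) := by
  simp [match_ROIs, PySem.List.foldl_append_if_eq_filter]

-- ===== VERDICT (by name: the statement is the Claim_ definition above) =====
theorem match_ROIs_spec : Claim_equal_match_ROIs := by
  intro d1 d2 _
  unfold Spec_match_ROIs match_ROIs_alt
  rw [match_ROIs_eq_filter]
  refine Eq.symm (PySem.List.sorted_eq_of_perm_of_pairwise_lt _ _ _ ?_ ?_)
  · apply (List.perm_ext_iff_of_nodup ?_ ?_).mpr
    · intro n
      simp only [List.mem_filter, PySem.Set.mem_inter, PySem.Set.mem_ofList,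
        Bool.and_eq_true, List.contains_iff_mem, roiOrder_contains_iff]
      tauto
    · exact totalROINames_nodup.filter _
    · exact List.Nodup.filter _
        (PySem.Set.nodup_inter _ _ (PySem.Set.nodup_ofList _))
  · exact totalROINames_pairwise.filter _
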